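-- pv_equiv track=rewrite | github.com/fmwalle/Data_Stracture_excersise | week1/isMonotonic.py | isPerfectWeave
-- ===== SOURCE A (Python) =====
-- def isPerfectWeave(deck: list[str]):
--
--     if len(deck)%2!=0 : return False
--     rb =True
--     br=True
--
--     for i in range(0,len(deck),2):
--         if(i+1<len(deck)):
--             rb=rb and deck[i]=='R' and deck[i+1]=='B'
--             br= br and deck[i]=='B' and deck[i+1]=='R'
--
--     return rb or br
-- ===== SOURCE B (Python) =====
-- def isPerfectWeave(deck: list[str]):
--     k = len(deck) // 2
--     return deck == ['R', 'B'] * k or deck == ['B', 'R'] * k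
-- ===== Notes on version B (the rewrite author's own statement) =====
-- stated objective: simpler
-- what changed: B constructs the two canonical perfect-weave reference lists of length 2*(n//2) once and returns whole-list equality of the deck against either, replacing A's explicit even-index loop that accumulates two running boolean flags (odd lengths fail automatically because the references have even length).
import Mathlib
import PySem

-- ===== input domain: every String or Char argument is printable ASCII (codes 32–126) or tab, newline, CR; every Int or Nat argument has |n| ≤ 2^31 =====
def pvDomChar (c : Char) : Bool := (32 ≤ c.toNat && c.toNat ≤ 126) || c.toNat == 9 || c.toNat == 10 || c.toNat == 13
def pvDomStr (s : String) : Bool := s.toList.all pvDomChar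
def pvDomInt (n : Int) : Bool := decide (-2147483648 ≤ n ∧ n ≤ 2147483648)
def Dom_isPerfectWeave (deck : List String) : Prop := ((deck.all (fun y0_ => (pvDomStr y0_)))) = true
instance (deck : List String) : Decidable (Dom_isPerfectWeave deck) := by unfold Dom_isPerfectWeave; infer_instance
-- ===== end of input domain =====

-- B builds the two canonical perfect-weave reference lists once and compares the deck
-- against them by whole-list equality, instead of A's strided index loop with two
-- running boolean flags (objective: simpler; same O(n) cost).

-- ===== PORT A =====
-- literal port of A: parity guard, then a loop over range(0, len(deck), 2)
-- carrying the two flags (rb, br); deck[i] is always in range when the loop body fires.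
def isPerfectWeave (deck : List String) : Bool :=
  if PySem.Int.mod (deck.length : Int) 2 ≠ 0 then false
  else
    let n : Int := (deck.length : Int)
    let st := (PySem.List.pyRange 0 n 2).foldl
      (fun (st : Bool × Bool) i =>
        if i + 1 < n then
          (st.1 && (PySem.List.pyGetD deck i "" == "R") && (PySem.List.pyGetD deck (i + 1) "" == "B"),
           st.2 && (PySem.List.pyGetD deck i "" == "B") && (PySem.List.pyGetD deck (i + 1) "" == "R"))
        else st)
      (true, true)
    st.1 || st.2

-- ===== PORT B =====
-- literal port of B: deck == ['R','B']*(len//2) or deck == ['B','R']*(len//2)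
def isPerfectWeave_alt (deck : List String) : Bool :=
  let k := deck.length / 2
  (deck == (List.replicate k ["R", "B"]).flatten) || (deck == (List.replicate k ["B", "R"]).flatten)

-- ===== PRECONDITION & SPEC =====
def Spec_isPerfectWeave (deck : List String) (out : Bool) : Prop := out = isPerfectWeave_alt deck
instance (deck : List String) (out : Bool) : Decidable (Spec_isPerfectWeave deck out) := by unfold Spec_isPerfectWeave; infer_instance

-- ===== CLAIM (what is proved, stated in full; the proofs are below) =====
def Claim_equal_isPerfectWeave : Prop := ∀ (deck : List String), Dom_isPerfectWeave deck → Spec_isPerfectWeave deck (isPerfectWeave deck)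

-- ===== LEMMAS AND PROOFS =====

-- A's loop re-indexed over Nat: fold over range m updating the two flags from pair k.
def loopA (deck : List String) (st : Bool × Bool) (m : Nat) : Bool × Bool :=
  (List.range m).foldl
    (fun st k =>
      (st.1 && (deck.getD (2 * k) "" == "R") && (deck.getD (2 * k + 1) "" == "B"),
       st.2 && (deck.getD (2 * k) "" == "B") && (deck.getD (2 * k + 1) "" == "R")))
    st

lemma loopA_bridge (deck : List String) (m : Nat) (h : deck.length = 2 * m) :
    isPerfectWeave deck = ((loopA deck (true, true) m).1 || (loopA deck (true, true) m).2) := by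
  unfold isPerfectWeave
  rw [h]
  have hmod : PySem.Int.mod ((2 * m : Nat) : Int) 2 = 0 := by
    rw [show ((2 * m : Nat) : Int) = ((2 * m : Nat) : Int) from rfl]
    rw [show (2 : Int) = ((2 : Nat) : Int) from rfl, PySem.Int.mod_natCast]
    simp [Nat.mul_mod_right]
  simp only [hmod, ne_eq, not_true_eq_false, if_false]
  rw [PySem.List.pyRange_of_pos 0 ((2 * m : Nat) : Int) (by norm_num)]
  have hcount : (if (0 : Int) < ((2 * m : Nat) : Int) then ((((2 * m : Nat) : Int) - 0 + 2 - 1) / 2).toNat else 0) = m := by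
    split_ifs with h0
    · omega
    · omega
  rw [hcount, List.foldl_map]
  unfold loopA
  rw [PySem.List.foldl_congr_mem]
  intro acc k hk
  have hk' : k < m := List.mem_range.mp hk
  have hlt : (0 : Int) + 2 * (k : Int) + 1 < ((2 * m : Nat) : Int) := by push_cast; omega
  simp only [hlt, if_pos]
  have e2 : (0 : Int) + 2 * (k : Int) + 1 = ((2 * k + 1 : Nat) : Int) := by push_cast; ring
  have e1 : (0 : Int) + 2 * (k : Int) = ((2 * k : Nat) : Int) := by push_cast; ring
  rw [e2, e1, PySem.List.pyGetD_natCast, PySem.List.pyGetD_natCast]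

lemma loopA_cons (x y : String) (rest : List String) (st : Bool × Bool) (m : Nat) :
    loopA (x :: y :: rest) st (m + 1) =
      loopA rest (st.1 && (x == "R") && (y == "B"), st.2 && (x == "B") && (y == "R")) m := by
  unfold loopA
  rw [List.range_succ_eq_map, List.foldl_cons, List.foldl_map]
  simp only [Nat.mul_zero, List.getD_cons_zero, Nat.zero_add, List.getD_cons_succ]
  rw [PySem.List.foldl_congr_mem]
  intro acc k _
  have e : 2 * (k + 1) = 2 * k + 1 + 1 := by omega
  simp only [Nat.succ_eq_add_one, e, List.getD_cons_succ]

-- length of the reference weave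
lemma length_flatten_replicate (m : Nat) (a b : String) :
    ((List.replicate m [a, b]).flatten).length = 2 * m := by
  induction m with
  | zero => simp
  | succ m ih => simp [List.replicate_succ, ih]; omega

-- core invariant: the two flag accumulators vs. the two whole-list comparisons
lemma loopA_char (m : Nat) : ∀ (rest : List String) (rb br : Bool), rest.length = 2 * m →
    ((loopA rest (rb, br) m).1 || (loopA rest (rb, br) m).2) =
      ((rb && (rest == (List.replicate m ["R", "B"]).flatten)) ||
       (br && (rest == (List.replicate m ["B", "R"]).flatten))) := by
  induction m with
  | zero =>
    intro rest rb br h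
    have : rest = [] := List.length_eq_zero_iff.mp (by omega)
    subst this
    simp [loopA]
  | succ m ih =>
    intro rest rb br h
    match rest, h with
    | x :: y :: rest', h =>
      have h' : rest'.length = 2 * m := by simp at h; omega
      rw [loopA_cons, ih rest' _ _ h']
      simp only [List.replicate_succ, List.flatten_cons, List.cons_append, List.nil_append,
        List.cons_beq_cons]
      cases x == "R" <;> cases y == "B" <;> cases x == "B" <;> cases y == "R" <;> simp

lemma beq_false_of_length_ne {xs ys : List String} (h : xs.length ≠ ys.length) : (xs == ys) = false := by
  rw [beq_eq_false_iff_ne]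
  intro he
  exact h (by rw [he])

lemma main_eq (deck : List String) : isPerfectWeave deck = isPerfectWeave_alt deck := by
  by_cases hpar : deck.length % 2 = 0
  · obtain ⟨m, hm⟩ : ∃ m, deck.length = 2 * m := ⟨deck.length / 2, by omega⟩
    rw [loopA_bridge deck m hm, loopA_char m deck true true hm]
    unfold isPerfectWeave_alt
    simp [hm]
  · -- odd length: A's guard fires; B's references have even length, so both comparisons fail
    have hA : isPerfectWeave deck = false := by
      unfold isPerfectWeave
      have : PySem.Int.mod ((deck.length : Nat) : Int) 2 ≠ 0 := by
        rw [show (2 : Int) = ((2 : Nat) : Int) from rfl, PySem.Int.mod_natCast]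
        simp only [ne_eq, Nat.cast_eq_zero]
        omega
      rw [if_pos this]
    rw [hA]
    unfold isPerfectWeave_alt
    have h1 : (deck == (List.replicate (deck.length / 2) ["R", "B"]).flatten) = false :=
      beq_false_of_length_ne (by rw [length_flatten_replicate]; omega)
    have h2 : (deck == (List.replicate (deck.length / 2) ["B", "R"]).flatten) = false :=
      beq_false_of_length_ne (by rw [length_flatten_replicate]; omega)
    simp [h1, h2]

-- ===== VERDICT (by name: the statement is the Claim_ definition above) =====
theorem isPerfectWeave_spec : Claim_equal_isPerfectWeave := by
  intro deck _
  unfold Spec_isPerfectWeave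
  exact main_eq deck
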